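-- pv_equiv track=rewrite | github.com/pypi-data/pypi-mirror-25 | packages/seefeel/seefeel-0.1.1.tar.gz/seefeel-0.1.1/seefeel/stringutils.py | backward_max_match
-- ===== SOURCE A (Python) =====
-- def backward_max_match(text, keys, min_len = 1, max_len = 10):
-- 	ind_list = []
-- 	ind = len(text)
--
-- 	while(ind > 0):
-- 		j = ind - max_len
--
-- 		while(j < ind):
-- 			if j < 0:
-- 				j += 1
-- 				continue
--
-- 			word = text[j: ind]
-- 			if word in keys:
-- 				ind_list.append((j, ind))
-- 				ind = j + 1
-- 				break
-- 			else:
-- 				j += 1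
--
-- 		ind -= 1
-- 	return ind_list
-- ===== SOURCE B (Python) =====
-- def backward_max_match(text, keys, min_len = 1, max_len = 10):
--     # Precompute the reversed keys and all their non-empty prefixes, then walk
--     # backwards from each right boundary through at most max_len characters,
--     # pruning as soon as the reversed suffix is no prefix of any reversed key.
--     rkeys = set(k[::-1] for k in keys)
--     prefixes = set(k[::-1][:i] for k in keys for i in range(1, len(k) + 1))
--     res = []
--     ind = len(text)
--     while ind > 0:
--         steps = max_len if max_len < ind else ind
--         cur = ""
--         best = 0
--         L = 1
--         while L <= steps:
--             cur += text[ind - L]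
--             if cur not in prefixes:
--                 break
--             if cur in rkeys:
--                 best = L
--             L += 1
--         if best > 0:
--             res.append((ind - best, ind))
--             ind -= best
--         else:
--             ind -= 1
--     return res
-- ===== Notes on version B (the rewrite author's own statement) =====
-- stated objective: faster
-- what changed: Replaces A's per-boundary descending window scan (substring slice + linear 'word in keys' list scan for every window length) by a precomputed reversed-key set and reversed-prefix set, walking characters backward from each boundary and pruning as soon as the reversed suffix is no prefix of any key.
import Mathlib
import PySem

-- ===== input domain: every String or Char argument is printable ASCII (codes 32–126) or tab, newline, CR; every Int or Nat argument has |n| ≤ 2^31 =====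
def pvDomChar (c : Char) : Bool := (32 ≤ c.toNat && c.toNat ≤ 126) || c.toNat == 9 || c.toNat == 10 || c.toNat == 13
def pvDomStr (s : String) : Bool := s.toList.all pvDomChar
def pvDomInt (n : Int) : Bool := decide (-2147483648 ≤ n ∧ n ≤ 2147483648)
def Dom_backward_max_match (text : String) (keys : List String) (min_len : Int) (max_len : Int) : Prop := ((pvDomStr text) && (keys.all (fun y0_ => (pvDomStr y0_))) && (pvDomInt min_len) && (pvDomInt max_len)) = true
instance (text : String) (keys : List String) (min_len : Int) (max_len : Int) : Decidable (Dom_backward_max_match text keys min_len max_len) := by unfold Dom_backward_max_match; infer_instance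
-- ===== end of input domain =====

-- B replaces A's descending substring-slice scan by a precomputed reversed-key /
-- reversed-prefix set and a pruned backward character walk (alternative algorithm,
-- same results; min_len is unused by A and stays unused).

-- ===== PORT A =====
-- inner while loop of A: j runs from ind - max_len up to ind (n counts the
-- remaining iterations, so j = ind - n), skipping negative j, returning the
-- first j whose word text[j:ind] is in keys
def pvInnerA (chars : List Char) (keys : List String) (ind : Int) : Nat → Option Int
  | 0 => none
  | n + 1 =>
    if ind - ((n : Int) + 1) < 0 then pvInnerA chars keys ind n
    else if String.ofList (PySem.List.slice chars (some (ind - ((n : Int) + 1))) (some ind)) ∈ keys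
      then some (ind - ((n : Int) + 1))
    else pvInnerA chars keys ind n

-- outer while loop of A; the Nat argument counts loop iterations (ind strictly
-- decreases each pass, so ind.toNat iterations suffice)
def pvOuterA (chars : List Char) (keys : List String) (max_len : Int) :
    Nat → Int → List (Int × Int) → List (Int × Int)
  | 0, _, acc => acc
  | n + 1, ind, acc =>
    if 0 < ind then
      match pvInnerA chars keys ind max_len.toNat with
      | some j => pvOuterA chars keys max_len n ((j + 1) - 1) (acc ++ [(j, ind)])
      | none => pvOuterA chars keys max_len n (ind - 1) acc
    else acc

def backward_max_match (text : String) (keys : List String) (min_len : Int) (max_len : Int) : List (Int × Int) :=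
  pvOuterA text.toList keys max_len text.toList.length (text.toList.length : Int) []

-- ===== PORT B =====
-- set of reversed keys and set of all non-empty prefixes of reversed keys
def pvRevKeys (keys : List String) : PySem.Set String :=
  PySem.Set.ofList (keys.map (fun k => String.ofList k.toList.reverse))

def pvPrefixList (keys : List String) : List String :=
  keys.flatMap (fun k => (List.range k.toList.length).map
    (fun i => String.ofList (k.toList.reverse.take (i + 1))))

def pvPrefixes (keys : List String) : PySem.Set String :=
  PySem.Set.ofList (pvPrefixList keys)

-- inner while loop of B: extend the reversed suffix cur one character at a time
-- (cur' = cur + text[ind - L]), pruning when it is no prefix of a reversed key,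
-- recording in best the deepest L whose reversed suffix is a reversed key;
-- the Nat argument counts the remaining iterations (steps - L + 1 at entry)
def pvWalkB (chars : List Char) (prefixes rkeys : PySem.Set String) (ind steps : Int) :
    Nat → Int → String → Int → Int
  | 0, _, _, best => best
  | r + 1, L, cur, best =>
    if L ≤ steps then
      if PySem.Set.contains prefixes (cur.push (PySem.List.pyGetD chars (ind - L) ' ')) then
        pvWalkB chars prefixes rkeys ind steps r (L + 1)
          (cur.push (PySem.List.pyGetD chars (ind - L) ' '))
          (if PySem.Set.contains rkeys (cur.push (PySem.List.pyGetD chars (ind - L) ' '))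
           then L else best)
      else best
    else best

-- outer while loop of B, same iteration counting as pvOuterA
def pvOuterB (chars : List Char) (prefixes rkeys : PySem.Set String) (max_len : Int) :
    Nat → Int → List (Int × Int) → List (Int × Int)
  | 0, _, acc => acc
  | n + 1, ind, acc =>
    if 0 < ind then
      if 0 < pvWalkB chars prefixes rkeys ind (if max_len < ind then max_len else ind)
          (if max_len < ind then max_len else ind).toNat 1 "" 0 then
        pvOuterB chars prefixes rkeys max_len n
          (ind - pvWalkB chars prefixes rkeys ind (if max_len < ind then max_len else ind)
            (if max_len < ind then max_len else ind).toNat 1 "" 0)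
          (acc ++ [(ind - pvWalkB chars prefixes rkeys ind (if max_len < ind then max_len else ind)
            (if max_len < ind then max_len else ind).toNat 1 "" 0, ind)])
      else pvOuterB chars prefixes rkeys max_len n (ind - 1) acc
    else acc

def backward_max_match_alt (text : String) (keys : List String) (min_len : Int) (max_len : Int) : List (Int × Int) :=
  pvOuterB text.toList (pvPrefixes keys) (pvRevKeys keys) max_len text.toList.length (text.toList.length : Int) []

-- ===== PRECONDITION & SPEC =====
def Spec_backward_max_match (text : String) (keys : List String) (min_len : Int) (max_len : Int) (out : List (Int × Int)) : Prop := out = backward_max_match_alt text keys min_len max_len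
instance (text : String) (keys : List String) (min_len : Int) (max_len : Int) (out : List (Int × Int)) : Decidable (Spec_backward_max_match text keys min_len max_len out) := by unfold Spec_backward_max_match; infer_instance

-- ===== CLAIM (what is proved, stated in full; the proofs are below) =====
def Claim_equal_backward_max_match : Prop := ∀ (text : String) (keys : List String) (min_len : Int) (max_len : Int), Dom_backward_max_match text keys min_len max_len → Spec_backward_max_match text keys min_len max_len (backward_max_match text keys min_len max_len)

-- ===== LEMMAS AND PROOFS =====

-- the word of length L ending at ind
def pvWordAt (chars : List Char) (ind : Int) (L : Nat) : List Char :=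
  (chars.drop (ind - L).toNat).take L

-- greatest L in [1, s] with pvWordAt … L ∈ keys, else 0
def pvBestUpTo (chars : List Char) (keys : List String) (ind : Int) : Nat → Nat
  | 0 => 0
  | s + 1 => if String.ofList (pvWordAt chars ind (s + 1)) ∈ keys then s + 1
             else pvBestUpTo chars keys ind s

theorem pvBestUpTo_le (chars : List Char) (keys : List String) (ind : Int) (s : Nat) :
    pvBestUpTo chars keys ind s ≤ s := by
  induction s with
  | zero => simp [pvBestUpTo]
  | succ n ih => simp only [pvBestUpTo]; split <;> omega

theorem pvBestUpTo_eq_of_no_hits (chars : List Char) (keys : List String) (ind : Int)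
    (a s : Nat) (ha : a ≤ s)
    (h : ∀ L, a < L → L ≤ s → String.ofList (pvWordAt chars ind L) ∉ keys) :
    pvBestUpTo chars keys ind s = pvBestUpTo chars keys ind a := by
  induction s with
  | zero => have : a = 0 := by omega
            rw [this]
  | succ n ih =>
    rcases Nat.eq_or_lt_of_le ha with rfl | hlt
    · rfl
    · have ha' : a ≤ n := by omega
      simp only [pvBestUpTo]
      rw [if_neg (h (n + 1) (by omega) le_rfl)]
      exact ih ha' (fun L h1 h2 => h L h1 (by omega))

theorem pvString_eq_of_toList (s t : String) (h : s.toList = t.toList) : s = t := by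
  rw [← String.ofList_toList (s := s), h, String.ofList_toList]

theorem pvWordAt_length (chars : List Char) (ind : Int) (L : Nat)
    (h1 : (L : Int) ≤ ind) (h2 : ind ≤ (chars.length : Int)) :
    (pvWordAt chars ind L).length = L := by
  simp [pvWordAt]; omega

-- word L is a suffix of word L' (L ≤ L')
theorem pvWordAt_drop (chars : List Char) (ind : Int) (L L' : Nat)
    (hLL : L ≤ L') (h1 : (L' : Int) ≤ ind) :
    (pvWordAt chars ind L').drop (L' - L) = pvWordAt chars ind L := by
  simp only [pvWordAt, List.drop_take, List.drop_drop]
  congr 1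
  · omega
  · congr 1
    omega

-- splitting off the first character of word L
theorem pvWordAt_cons (chars : List Char) (ind : Int) (L : Nat)
    (hL : 1 ≤ L) (h1 : (L : Int) ≤ ind) (h2 : ind ≤ (chars.length : Int)) :
    pvWordAt chars ind L = chars[(ind - L).toNat]'(by omega) :: pvWordAt chars ind (L - 1) := by
  obtain ⟨n, rfl⟩ : ∃ n, L = n + 1 := ⟨L - 1, by omega⟩
  have hix : (ind - (n + 1 : Nat)).toNat < chars.length := by omega
  have harg : (ind - ((n + 1 : Nat) : Int)).toNat + 1 = (ind - ((n : Nat) : Int)).toNat := by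
    push_cast
    omega
  simp only [pvWordAt]
  rw [List.drop_eq_getElem_cons hix, List.take_succ_cons, Nat.add_sub_cancel, ← harg]

-- cur' ∈ rkeys ↔ word ∈ keys
theorem pvMem_revKeys (keys : List String) (w : List Char) :
    (String.ofList w.reverse ∈ pvRevKeys keys) ↔ String.ofList w ∈ keys := by
  unfold pvRevKeys
  rw [PySem.Set.mem_ofList]
  simp only [List.mem_map]
  constructor
  · rintro ⟨k, hk, he⟩
    rw [String.ofList_inj] at he
    have : k.toList = w := by
      have := congrArg List.reverse he
      simpa using this
    rwa [← this, String.ofList_toList]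
  · intro hw
    exact ⟨String.ofList w, hw, by rw [String.ofList_inj]; simp⟩

-- if some word of length L' ≥ L matches a key, the reversed word of length L is a stored prefix
theorem pvMem_prefixes (chars : List Char) (keys : List String) (ind : Int) (L L' : Nat)
    (hk : String.ofList (pvWordAt chars ind L') ∈ keys)
    (hL : 1 ≤ L) (hLL : L ≤ L') (h1 : (L' : Int) ≤ ind) (h2 : ind ≤ (chars.length : Int)) :
    String.ofList (pvWordAt chars ind L).reverse ∈ pvPrefixList keys := by
  unfold pvPrefixList
  rw [List.mem_flatMap]
  refine ⟨String.ofList (pvWordAt chars ind L'), hk, ?_⟩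
  rw [List.mem_map]
  have hlen' : (pvWordAt chars ind L').length = L' := pvWordAt_length chars ind L' h1 h2
  refine ⟨L - 1, by simp [String.toList_ofList, hlen']; omega, ?_⟩
  rw [String.ofList_inj, String.toList_ofList]
  have hstep : (pvWordAt chars ind L').reverse.take (L - 1 + 1)
      = ((pvWordAt chars ind L').drop (L' - L)).reverse := by
    rw [List.reverse_drop, hlen']
    congr 1
    omega
  rw [hstep, pvWordAt_drop chars ind L L' hLL h1]

-- main inner-loop lemma, B side
theorem pvWalkB_eq (chars : List Char) (keys : List String) (ind steps : Int)
    (hind : 0 < ind) (hlen : ind ≤ (chars.length : Int)) (hsteps : steps ≤ ind) :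
    ∀ (r : Nat) (L : Int), 1 ≤ L → (L ≤ steps + 1 ∨ L = 1) → (r : Int) = max (steps + 1 - L) 0 →
    pvWalkB chars (pvPrefixes keys) (pvRevKeys keys) ind steps r L
      (String.ofList (pvWordAt chars ind (L - 1).toNat).reverse)
      (pvBestUpTo chars keys ind (L - 1).toNat)
    = pvBestUpTo chars keys ind steps.toNat := by
  intro r
  induction r with
  | zero =>
    intro L hL hLs hr
    simp only [pvWalkB]
    have h1 : (L - 1).toNat = steps.toNat := by rcases hLs with h | h <;> omega
    rw [h1]
  | succ r ih =>
    intro L hL hLs hr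
    have hcond : L ≤ steps := by omega
    simp only [pvWalkB]
    rw [if_pos hcond]
    have hword : (String.ofList (pvWordAt chars ind (L - 1).toNat).reverse).push
        (PySem.List.pyGetD chars (ind - L) ' ')
        = String.ofList (pvWordAt chars ind L.toNat).reverse := by
      apply pvString_eq_of_toList
      rw [String.toList_push, String.toList_ofList, String.toList_ofList]
      have hc : PySem.List.pyGetD chars (ind - L) ' ' = chars[(ind - L).toNat]'(by omega) := by
        rw [PySem.List.pyGetD_eq_getElem chars ' ' (by omega) (by omega)]
      rw [hc, pvWordAt_cons chars ind L.toNat (by omega) (by omega) hlen]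
      have h1 : (L.toNat - 1) = (L - 1).toNat := by omega
      rw [h1, List.reverse_cons]
      congr 3
      omega
    rw [hword]
    by_cases hpre : String.ofList (pvWordAt chars ind L.toNat).reverse ∈ pvPrefixList keys
    · have hcpos : PySem.Set.contains (pvPrefixes keys)
          (String.ofList (pvWordAt chars ind L.toNat).reverse) = true := by
        simp [PySem.Set.contains, pvPrefixes, PySem.Set.mem_ofList]
        exact hpre
      rw [if_pos hcpos]
      have harg : (if PySem.Set.contains (pvRevKeys keys)
            (String.ofList (pvWordAt chars ind L.toNat).reverse) = true then L
           else ((pvBestUpTo chars keys ind (L - 1).toNat : Nat) : Int))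
          = ((pvBestUpTo chars keys ind L.toNat : Nat) : Int) := by
        obtain ⟨m, hm⟩ : ∃ m, L.toNat = m + 1 := ⟨L.toNat - 1, by omega⟩
        by_cases hkm : String.ofList (pvWordAt chars ind L.toNat) ∈ keys
        · rw [if_pos (by simp [PySem.Set.contains]
                         exact (pvMem_revKeys keys _).mpr hkm)]
          rw [hm]
          simp only [pvBestUpTo]
          rw [← hm, if_pos hkm]
          omega
        · rw [if_neg (by simp [PySem.Set.contains]
                         exact fun hmem => hkm ((pvMem_revKeys keys _).mp hmem))]
          rw [hm]
          simp only [pvBestUpTo]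
          rw [← hm, if_neg hkm]
          rw [show m = (L - 1).toNat by omega]
      rw [harg]
      have hrec := ih (L + 1) (by omega) (Or.inl (by omega)) (by omega)
      have h2 : (L + 1 - 1).toNat = L.toNat := by omega
      rw [h2] at hrec
      exact hrec
    · have hcneg : ¬ (PySem.Set.contains (pvPrefixes keys)
          (String.ofList (pvWordAt chars ind L.toNat).reverse) = true) := by
        simp [PySem.Set.contains, pvPrefixes, PySem.Set.mem_ofList]
        exact hpre
      rw [if_neg hcneg]
      rw [pvBestUpTo_eq_of_no_hits chars keys ind (L - 1).toNat steps.toNat (by omega)]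
      intro L' hgt hle hkmem
      exact hpre (pvMem_prefixes chars keys ind L.toNat L' hkmem (by omega) (by omega)
        (by omega) hlen)

-- A side: the inner scan returns the longest match (fuel small enough that j stays ≥ 0)
theorem pvInnerA_eq (chars : List Char) (keys : List String) (ind : Int)
    (hind : 0 ≤ ind) :
    ∀ (n : Nat), (n : Int) ≤ ind →
    pvInnerA chars keys ind n =
      (if pvBestUpTo chars keys ind n = 0 then none
       else some (ind - pvBestUpTo chars keys ind n)) := by
  intro n
  induction n with
  | zero => intro _; simp [pvInnerA, pvBestUpTo]
  | succ n ih =>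
    intro hn
    simp only [pvInnerA]
    rw [if_neg (by omega)]
    have hword : PySem.List.slice chars (some (ind - ((n : Int) + 1))) (some ind)
        = pvWordAt chars ind (n + 1) := by
      rw [PySem.List.slice_toNat chars (by omega) hind]
      simp only [pvWordAt]
      congr 2 <;> omega
    rw [hword]
    simp only [pvBestUpTo]
    by_cases hk : String.ofList (pvWordAt chars ind (n + 1)) ∈ keys
    · rw [if_pos hk, if_pos hk, if_neg (by omega)]
      all_goals norm_num
    · rw [if_neg hk, if_neg hk, ih (by omega)]

-- A side: surplus fuel beyond ind only skips negative j
theorem pvInnerA_gt (chars : List Char) (keys : List String) (ind : Int)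
    (hind : 0 ≤ ind) :
    ∀ (n : Nat), ind < (n : Int) →
    pvInnerA chars keys ind n = pvInnerA chars keys ind ind.toNat := by
  intro n
  induction n with
  | zero => intro h; omega
  | succ n ih =>
    intro hn
    simp only [pvInnerA]
    rw [if_pos (by omega)]
    by_cases h : ind < (n : Int)
    · exact ih h
    · rw [show ind.toNat = n by omega]

-- outer loops agree
theorem pvOuter_eq (chars : List Char) (keys : List String) (max_len : Int) :
    ∀ (n : Nat) (ind : Int) (acc : List (Int × Int)),
    ind ≤ (n : Int) → 0 ≤ ind → ind ≤ (chars.length : Int) →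
    pvOuterA chars keys max_len n ind acc
      = pvOuterB chars (pvPrefixes keys) (pvRevKeys keys) max_len n ind acc := by
  intro n
  induction n with
  | zero => intro ind acc _ _ _; rfl
  | succ n ih =>
    intro ind acc hn h0 hlen
    by_cases hind : 0 < ind
    case neg => simp only [pvOuterA, pvOuterB]; rw [if_neg hind, if_neg hind]
    case pos =>
      simp only [pvOuterA, pvOuterB]
      rw [if_pos hind, if_pos hind]
      by_cases hcase : max_len < ind
      · rw [if_pos hcase]
        have hwalk : pvWalkB chars (pvPrefixes keys) (pvRevKeys keys) ind max_len
            max_len.toNat 1 "" 0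
            = ((pvBestUpTo chars keys ind max_len.toNat : Nat) : Int) := by
          have h1 : String.ofList (pvWordAt chars ind ((1 : Int) - 1).toNat).reverse = "" := by
            simp [pvWordAt]
          have h2 : pvBestUpTo chars keys ind ((1 : Int) - 1).toNat = 0 := by
            norm_num [pvBestUpTo]
          have := pvWalkB_eq chars keys ind max_len hind hlen (by omega)
            max_len.toNat 1 le_rfl (Or.inr rfl) (by omega)
          rw [h1, h2] at this
          exact this
        have hinner : pvInnerA chars keys ind max_len.toNat
            = (if pvBestUpTo chars keys ind max_len.toNat = 0 then none
               else some (ind - pvBestUpTo chars keys ind max_len.toNat)) :=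
          pvInnerA_eq chars keys ind (by omega) max_len.toNat (by omega)
        have hble := pvBestUpTo_le chars keys ind max_len.toNat
        rw [hinner, hwalk]
        by_cases hb : pvBestUpTo chars keys ind max_len.toNat = 0
        · rw [if_pos hb, if_neg (by omega)]
          exact ih (ind - 1) acc (by omega) (by omega) (by omega)
        · rw [if_neg hb, if_pos (by omega)]
          show pvOuterA chars keys max_len n
              ((ind - ((pvBestUpTo chars keys ind max_len.toNat : Nat) : Int)) + 1 - 1)
              (acc ++ [(ind - ((pvBestUpTo chars keys ind max_len.toNat : Nat) : Int), ind)]) = _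
          rw [show ind - ((pvBestUpTo chars keys ind max_len.toNat : Nat) : Int) + 1 - 1
              = ind - ((pvBestUpTo chars keys ind max_len.toNat : Nat) : Int) from by omega]
          exact ih _ _ (by omega) (by omega) (by omega)
      · rw [if_neg hcase]
        have hwalk : pvWalkB chars (pvPrefixes keys) (pvRevKeys keys) ind ind
            ind.toNat 1 "" 0
            = ((pvBestUpTo chars keys ind ind.toNat : Nat) : Int) := by
          have h1 : String.ofList (pvWordAt chars ind ((1 : Int) - 1).toNat).reverse = "" := by
            simp [pvWordAt]
          have h2 : pvBestUpTo chars keys ind ((1 : Int) - 1).toNat = 0 := by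
            norm_num [pvBestUpTo]
          have := pvWalkB_eq chars keys ind ind hind hlen le_rfl
            ind.toNat 1 le_rfl (Or.inr rfl) (by omega)
          rw [h1, h2] at this
          exact this
        have hinner : pvInnerA chars keys ind max_len.toNat
            = (if pvBestUpTo chars keys ind ind.toNat = 0 then none
               else some (ind - pvBestUpTo chars keys ind ind.toNat)) := by
          by_cases hml : (max_len.toNat : Int) ≤ ind
          · rw [pvInnerA_eq chars keys ind (by omega) max_len.toNat hml]
            rw [show max_len.toNat = ind.toNat from by omega]
          · rw [pvInnerA_gt chars keys ind (by omega) max_len.toNat (by omega),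
              pvInnerA_eq chars keys ind (by omega) ind.toNat (by omega)]
        have hble := pvBestUpTo_le chars keys ind ind.toNat
        rw [hinner, hwalk]
        by_cases hb : pvBestUpTo chars keys ind ind.toNat = 0
        · rw [if_pos hb, if_neg (by omega)]
          exact ih (ind - 1) acc (by omega) (by omega) (by omega)
        · rw [if_neg hb, if_pos (by omega)]
          show pvOuterA chars keys max_len n
              ((ind - ((pvBestUpTo chars keys ind ind.toNat : Nat) : Int)) + 1 - 1)
              (acc ++ [(ind - ((pvBestUpTo chars keys ind ind.toNat : Nat) : Int), ind)]) = _
          rw [show ind - ((pvBestUpTo chars keys ind ind.toNat : Nat) : Int) + 1 - 1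
              = ind - ((pvBestUpTo chars keys ind ind.toNat : Nat) : Int) from by omega]
          exact ih _ _ (by omega) (by omega) (by omega)

-- ===== VERDICT (by name: the statement is the Claim_ definition above) =====
theorem backward_max_match_spec : Claim_equal_backward_max_match := by
  intro text keys min_len max_len _
  unfold Spec_backward_max_match backward_max_match backward_max_match_alt
  exact pvOuter_eq text.toList keys max_len text.toList.length (text.toList.length : Int) []
    le_rfl (by exact_mod_cast Int.natCast_nonneg _) le_rfl
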